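-- pv_equiv track=rewrite | github.com/gerhardJaeger/consonant-stability-lean | scripts/generate-series.py | tf_op_category
-- ===== SOURCE A (Python) =====
-- from copy import deepcopy
--
-- CAT = "category"
--
-- def tf_op_category(op):
--     plosive_in_op = False
--     for op_tup in op:
--         if CAT in op_tup and op_tup[CAT] == "plosive":
--             plosive_in_op = True
--     if not plosive_in_op:
--         return op
--     op_fricative = deepcopy(op)
--     for op_tup in op_fricative:
--         if CAT in op_tup and op_tup[CAT] == "plosive":
--             op_tup[CAT] = "fricative"
--     return op_fricative
-- ===== SOURCE B (Python) =====
-- CAT = "category"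
--
--
-- def tf_op_category(op):
--     # Single left-to-right pass: rebuild the list, rewriting plosive entries
--     # and flagging whether anything changed; return the original on a no-op.
--     result = []
--     changed = False
--     for op_tup in op:
--         if CAT in op_tup and op_tup[CAT] == "plosive":
--             changed = True
--             new_tup = dict(op_tup)
--             new_tup[CAT] = "fricative"
--             result.append(new_tup)
--         else:
--             result.append(op_tup)
--     return result if changed else op
-- ===== Notes on version B (the rewrite author's own statement) =====
-- stated objective: simpler
-- what changed: Replaced A's two-pass detect-then-deepcopy-and-mutate scheme by a single pass that rebuilds the list while tracking a changed flag, copying only the entries that are actually rewritten.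
import Mathlib
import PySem

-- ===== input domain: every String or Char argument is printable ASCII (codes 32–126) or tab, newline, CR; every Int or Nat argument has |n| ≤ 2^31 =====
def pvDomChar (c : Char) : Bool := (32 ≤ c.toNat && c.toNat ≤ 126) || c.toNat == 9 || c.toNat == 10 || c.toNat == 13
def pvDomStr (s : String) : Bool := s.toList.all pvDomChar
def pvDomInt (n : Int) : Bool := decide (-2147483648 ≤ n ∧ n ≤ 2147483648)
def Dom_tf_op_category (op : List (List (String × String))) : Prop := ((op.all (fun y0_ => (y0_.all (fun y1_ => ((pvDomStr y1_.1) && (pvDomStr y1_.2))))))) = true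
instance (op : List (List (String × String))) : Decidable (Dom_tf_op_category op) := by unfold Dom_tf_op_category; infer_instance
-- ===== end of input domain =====

-- B replaces A's two-pass detect-then-deepcopy-and-mutate scheme by one pass that rebuilds
-- the list with a changed flag (objective: simpler); return values proved equal on Dom.

-- ===== PORT A =====
-- `CAT in op_tup and op_tup[CAT] == "plosive"` on a dict: first-match lookup equals "plosive"
def pvIsPlosive (t : List (String × String)) : Bool :=
  t.lookup "category" == some "plosive"

-- `op_tup[CAT] = "fricative"` on a dict: overwrite the first "category" entry in place
def pvSetFricative : List (String × String) → List (String × String)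
  | [] => []
  | (k, v) :: r => if k = "category" then (k, "fricative") :: r else (k, v) :: pvSetFricative r

def tf_op_category (op : List (List (String × String))) : List (List (String × String)) :=
  let plosive_in_op := op.foldl (fun b op_tup => if pvIsPlosive op_tup then true else b) false
  if !plosive_in_op then op
  else
    -- deepcopy then mutate each plosive entry: value-wise, a map over the copy
    op.map (fun op_tup => if pvIsPlosive op_tup then pvSetFricative op_tup else op_tup)

-- ===== PORT B =====
def tf_op_category_alt (op : List (List (String × String))) : List (List (String × String)) :=
  let st := op.foldl
    (fun (acc : Bool × List (List (String × String))) op_tup =>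
      if pvIsPlosive op_tup then (true, acc.2 ++ [pvSetFricative op_tup])
      else (acc.1, acc.2 ++ [op_tup]))
    (false, [])
  if st.1 then st.2 else op

-- ===== PRECONDITION & SPEC =====
def Spec_tf_op_category (op : List (List (String × String))) (out : List (List (String × String))) : Prop := out = tf_op_category_alt op
instance (op : List (List (String × String))) (out : List (List (String × String))) : Decidable (Spec_tf_op_category op out) := by unfold Spec_tf_op_category; infer_instance

-- ===== CLAIM (what is proved, stated in full; the proofs are below) =====
def Claim_equal_tf_op_category : Prop := ∀ (op : List (List (String × String))), Dom_tf_op_category op → Spec_tf_op_category op (tf_op_category op)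

-- ===== LEMMAS AND PROOFS =====

theorem pvFlag_eq_any (op : List (List (String × String))) (b : Bool) :
    op.foldl (fun b op_tup => if pvIsPlosive op_tup then true else b) b
      = (b || op.any pvIsPlosive) := by
  induction op generalizing b with
  | nil => simp
  | cons t r ih =>
    simp only [List.foldl, List.any_cons]
    rw [ih]
    by_cases h : pvIsPlosive t = true <;> simp [h]

theorem pvAlt_fold (op : List (List (String × String))) (c : Bool)
    (res : List (List (String × String))) :
    op.foldl
      (fun (acc : Bool × List (List (String × String))) op_tup =>
        if pvIsPlosive op_tup then (true, acc.2 ++ [pvSetFricative op_tup])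
        else (acc.1, acc.2 ++ [op_tup]))
      (c, res)
      = (c || op.any pvIsPlosive,
         res ++ op.map (fun t => if pvIsPlosive t then pvSetFricative t else t)) := by
  induction op generalizing c res with
  | nil => simp
  | cons t r ih =>
    simp only [List.foldl, List.any_cons, List.map_cons]
    by_cases h : pvIsPlosive t = true <;> simp [h, ih]

-- ===== VERDICT (by name: the statement is the Claim_ definition above) =====
theorem tf_op_category_spec : Claim_equal_tf_op_category := by
  intro op _
  unfold Spec_tf_op_category tf_op_category tf_op_category_alt
  rw [pvFlag_eq_any, pvAlt_fold]
  simp only [Bool.false_or, List.nil_append]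
  by_cases h : op.any pvIsPlosive = true <;> simp [h]
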